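-- pv_equiv track=rewrite | github.com/Dittam/Real-Time-Object-Detection | a1.py | pair_genes
-- ===== SOURCE A (Python) =====
-- def pair_genes(gene1, gene2):
--     '''(str, str) -> bool
--     Given (gene1) and (gene2) which are strings that represent genes, will
--     return True only if all nucleotides of one gene can pair with the
--     corresponding nucleotides of another gene.
--     REQ: gene1 and gene2 must be comprised of only 'A', 'T', 'G', 'C'
--     REQ: gene1 and gene2 must be the same length
--     REQ: gene1 and gene2 cannot be empty
--     >>> pair_genes('TCAG','AGTC')
--     True
--     >>> pair_genes('TCAG','CTGA')
--     True
--     >>> pair_genes('TCAG','TTGA')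
--     False
--     '''
--     # if genes are not of smae length they are automatically unpairable
--     if len(gene1) != len(gene2):
--         pairable = False
--     else:
--         # create list with all valid nucleotide pairs
--         possible_pairs = ['AT', 'GC', 'TA', 'CG', 'A*', '*A', 'T*', '*T',
--                           'G*', '*G', 'C*', '*C']
--         # initialize pair-validity variables for forward and reversed gene2
--         valid_forward, valid_reversed = True, True
--         index = 0
--         # run loop as long as nucleotide pairs of the forward or revered genes
--         # are valid or index reached end of genes
--         while (index < len(gene1)) and (valid_forward or valid_reversed):
--             # Combine nucleotides of gene1 and gene2 at current index
--             pair_forward = gene1[index] + gene2[index]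
--             # Check if if nucleotide pair AT CURRENT index is valid IFF
--             # nucleotide pairs UP UNTIL current index are valid
--             if valid_forward and (pair_forward in possible_pairs):
--                 valid_forward = True
--             else:
--                 valid_forward = False
--
--             # Combine nucleotides of gene1 and reversed gene2 at current index
--             pair_reversed = gene1[index] + gene2[-(index + 1)]
--             # Check if nucleotide pair of REVERSED gene2 at CURRENT index is
--             # valid IFF nucleotide pairs in REVERSED gene2 UP UNTIL current
--             # index are valid
--             if valid_reversed and (pair_reversed in possible_pairs):
--                 valid_reversed = True
--             else:
--                 valid_reversed = False
--             # Continue to next index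
--             index += 1
--         # Return whether all nucleotides in gene1 and gene2 can be paired
--         # successfully, forward or reversed
--         pairable = bool(max(valid_forward, valid_reversed))
--
--     return pairable
-- ===== SOURCE B (Python) =====
-- COMP = {'A': 'T', 'T': 'A', 'G': 'C', 'C': 'G'}
--
-- def _ok(a, b):
--     # a pairs with b iff b is a's Watson-Crick complement, or one side is the
--     # '*' wildcard and the other is a real nucleotide (a key of COMP)
--     return COMP.get(a) == b or (a == '*' and b in COMP) or (b == '*' and a in COMP)
--
-- def pair_genes(gene1, gene2):
--     if len(gene1) != len(gene2):
--         return False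
--     return (all(_ok(a, b) for a, b in zip(gene1, gene2))
--             or all(_ok(a, b) for a, b in zip(gene1, reversed(gene2))))
-- ===== Notes on version B (the rewrite author's own statement) =====
-- stated objective: simpler
-- what changed: A's hard-coded 12-entry valid-pair list and fused two-flag short-circuiting while-loop over indices are replaced by a 4-entry Watson-Crick complement map defining per-character validity (complement match, or '*' wildcard against a real nucleotide) and two zip scans of gene1 against gene2 and reversed(gene2).
import Mathlib
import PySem

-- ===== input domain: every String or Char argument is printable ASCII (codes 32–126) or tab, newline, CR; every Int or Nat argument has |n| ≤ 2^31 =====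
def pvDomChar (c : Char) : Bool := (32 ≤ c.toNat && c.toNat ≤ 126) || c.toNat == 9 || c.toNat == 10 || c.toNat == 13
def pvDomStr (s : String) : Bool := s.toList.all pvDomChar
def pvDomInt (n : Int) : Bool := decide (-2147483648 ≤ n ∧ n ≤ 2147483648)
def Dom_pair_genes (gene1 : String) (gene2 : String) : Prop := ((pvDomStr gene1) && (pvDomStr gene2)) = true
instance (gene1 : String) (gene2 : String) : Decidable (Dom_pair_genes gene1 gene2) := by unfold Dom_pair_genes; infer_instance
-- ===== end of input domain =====

-- B drops A's 12-entry pair list and fused two-flag while-loop entirely: it derives validity of a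
-- character pair from a 4-entry Watson-Crick complement map (plus a wildcard rule) and scans by
-- zipping gene1 with gene2 / reversed gene2; same O(n) cost, simpler.

-- ===== PORT A =====
-- A's literal pair list; Python 2-char strings are represented as their char lists
def pvPairsA : List (List Char) :=
  [['A','T'], ['G','C'], ['T','A'], ['C','G'], ['A','*'], ['*','A'], ['T','*'], ['*','T'],
   ['G','*'], ['*','G'], ['C','*'], ['*','C']]

-- A's while loop: state (index, valid_forward, valid_reversed); indices are in range (i < n =
-- both lengths), so Python's gene1[index] / gene2[-(index+1)] are List.getD i / getD (n-1-i).
def pvLoopA (g1 g2 : List Char) (n : Nat) (i : Nat) (vf vr : Bool) : Bool × Bool :=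
  if i < n ∧ (vf || vr) then
    let pair_forward := [g1.getD i ' ', g2.getD i ' ']
    let vf' := if vf && pvPairsA.contains pair_forward then true else false
    let pair_reversed := [g1.getD i ' ', g2.getD (n - 1 - i) ' ']
    let vr' := if vr && pvPairsA.contains pair_reversed then true else false
    pvLoopA g1 g2 n (i + 1) vf' vr'
  else (vf, vr)
termination_by n - i

def pair_genes (gene1 : String) (gene2 : String) : Bool :=
  if gene1.toList.length ≠ gene2.toList.length then false
  else
    let r := pvLoopA gene1.toList gene2.toList gene1.toList.length 0 true true
    -- bool(max(valid_forward, valid_reversed)) = vf || vr on Bool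
    r.1 || r.2

-- ===== PORT B =====
-- COMP = {'A': 'T', 'T': 'A', 'G': 'C', 'C': 'G'}
def pvComp : PySem.Dict Char Char :=
  PySem.Dict.ofList [('A', 'T'), ('T', 'A'), ('G', 'C'), ('C', 'G')]

-- _ok(a, b): COMP.get(a) == b or (a == '*' and b in COMP) or (b == '*' and a in COMP)
def pvOk (a b : Char) : Bool :=
  (pvComp.get? a == some b) || (a == '*' && pvComp.contains b) || (b == '*' && pvComp.contains a)

def pair_genes_alt (gene1 : String) (gene2 : String) : Bool :=
  if gene1.toList.length ≠ gene2.toList.length then false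
  else
    ((gene1.toList.zip gene2.toList).all fun p => pvOk p.1 p.2)
      || ((gene1.toList.zip gene2.toList.reverse).all fun p => pvOk p.1 p.2)

-- ===== PRECONDITION & SPEC =====
def Spec_pair_genes (gene1 : String) (gene2 : String) (out : Bool) : Prop := out = pair_genes_alt gene1 gene2
instance (gene1 : String) (gene2 : String) (out : Bool) : Decidable (Spec_pair_genes gene1 gene2 out) := by unfold Spec_pair_genes; infer_instance

-- ===== CLAIM (what is proved, stated in full; the proofs are below) =====
def Claim_equal_pair_genes : Prop := ∀ (gene1 : String) (gene2 : String), Dom_pair_genes gene1 gene2 → Spec_pair_genes gene1 gene2 (pair_genes gene1 gene2)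

-- ===== LEMMAS AND PROOFS =====

-- pvComp evaluated on an arbitrary key
theorem pvComp_get (a : Char) : pvComp.get? a =
    if a = 'A' then some 'T' else if a = 'T' then some 'A'
    else if a = 'G' then some 'C' else if a = 'C' then some 'G' else none := by
  simp [pvComp, PySem.Dict.ofList, PySem.Dict.update, PySem.Dict.get?_insert,
    PySem.Dict.get?_empty]
  split_ifs <;> simp_all

theorem pvComp_contains (a : Char) : pvComp.contains a =
    (a == 'A' || a == 'T' || a == 'G' || a == 'C') := by
  simp [pvComp, PySem.Dict.ofList, PySem.Dict.update, PySem.Dict.contains_insert,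
    PySem.Dict.contains_empty]
  cases h1 : a == 'A' <;> cases h2 : a == 'T' <;> cases h3 : a == 'G' <;> cases h4 : a == 'C' <;>
    simp_all [BEq.comm]

-- A's pair-list membership coincides with B's complement/wildcard relation.
theorem pvOk_eq (a b : Char) : pvPairsA.contains [a, b] = pvOk a b := by
  rw [Bool.eq_iff_iff]
  simp only [pvPairsA, pvOk, pvComp_get, pvComp_contains, List.contains_eq_any_beq,
    List.any_cons, List.any_nil, Bool.or_eq_true, Bool.and_eq_true, beq_iff_eq,
    List.cons.injEq, and_true]
  rcases Decidable.em (a = 'A') with ha | ha <;> rcases Decidable.em (a = 'T') with h2 | h2 <;>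
    rcases Decidable.em (a = 'G') with h3 | h3 <;> rcases Decidable.em (a = 'C') with h4 | h4 <;>
    rcases Decidable.em (a = '*') with h5 | h5 <;>
    simp_all <;> tauto

-- The loop with accumulators (vf, vr) computes (vf && allFrom i, vr && allFrom i):
-- even the short-circuit exit (vf = vr = false) agrees, since false && _ = false.
theorem pvLoopA_eq (g1 g2 : List Char) (n : Nat) :
    ∀ (k i : Nat) (vf vr : Bool), i + k = n →
    pvLoopA g1 g2 n i vf vr =
      (vf && (List.range' i k).all
          (fun j => pvPairsA.contains [g1.getD j ' ', g2.getD j ' ']),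
       vr && (List.range' i k).all
          (fun j => pvPairsA.contains [g1.getD j ' ', g2.getD (n - 1 - j) ' '])) := by
  intro k
  induction k with
  | zero =>
    intro i vf vr h
    rw [pvLoopA, if_neg (fun hc => absurd hc.1 (by omega))]
    simp
  | succ k ih =>
    intro i vf vr h
    rw [pvLoopA]
    by_cases hvr : (vf || vr) = true
    · rw [if_pos ⟨by omega, hvr⟩]
      rw [ih (i + 1) _ _ (by omega)]
      simp only [List.range'_succ, List.all_cons]
      simp [Bool.and_assoc]
    · have hvf : vf = false := by revert hvr; cases vf <;> cases vr <;> simp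
      have hvr' : vr = false := by revert hvr; cases vf <;> cases vr <;> simp
      rw [if_neg (by simp [hvr])]
      simp [hvf, hvr']

-- An indexed scan over range(len g1) is the zip scan, for equal-length lists.
theorem all_range_eq_zip (f : Char → Char → Bool) :
    ∀ (g1 g2 : List Char), g1.length = g2.length →
    (List.range g1.length).all (fun j => f (g1.getD j ' ') (g2.getD j ' ')) =
      (g1.zip g2).all (fun p => f p.1 p.2) := by
  intro g1
  induction g1 with
  | nil => intro g2 h; simp
  | cons x xs ih =>
    intro g2 h
    cases g2 with
    | nil => simp at h
    | cons y ys =>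
      simp only [List.length_cons, List.range_succ_eq_map, List.all_cons, List.all_map,
        List.zip_cons_cons, List.getD_cons_zero]
      have hc : ((fun j => f ((x :: xs).getD j ' ') ((y :: ys).getD j ' ')) ∘ Nat.succ) =
          (fun j => f (xs.getD j ' ') (ys.getD j ' ')) := by
        funext j; simp
      rw [hc, ih ys (by simpa using h)]

theorem all_range_congr (n : Nat) (f g : Nat → Bool) (h : ∀ j, j < n → f j = g j) :
    (List.range n).all f = (List.range n).all g := by
  rw [Bool.eq_iff_iff]
  simp only [List.all_eq_true, List.mem_range]
  constructor <;> intro hx j hj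
  · rw [← h j hj]; exact hx j hj
  · rw [h j hj]; exact hx j hj

-- Python's gene2[-(j+1)] (= getD (n-1-j)) is position j of the reversed list.
theorem getD_reverse_eq (g1 g2 : List Char) (h : g1.length = g2.length) (j : Nat)
    (hj : j < g1.length) : g2.getD (g1.length - 1 - j) ' ' = g2.reverse.getD j ' ' := by
  have h1 : g1.length - 1 - j < g2.length := by omega
  have h2 : j < g2.reverse.length := by simpa using (show j < g2.length by omega)
  rw [List.getD_eq_getElem _ _ h1, List.getD_eq_getElem _ _ h2, List.getElem_reverse]
  congr 1; omega

-- ===== VERDICT (by name: the statement is the Claim_ definition above) =====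
theorem pair_genes_spec : Claim_equal_pair_genes := by
  intro gene1 gene2 _
  unfold Spec_pair_genes pair_genes pair_genes_alt
  by_cases h : gene1.toList.length = gene2.toList.length
  · rw [if_neg (not_not_intro h), if_neg (not_not_intro h)]
    rw [pvLoopA_eq gene1.toList gene2.toList gene1.toList.length gene1.toList.length 0 true true
        (by omega)]
    simp only [Bool.true_and, ← List.range_eq_range']
    congr 1
    · rw [show (fun j => pvPairsA.contains [gene1.toList.getD j ' ', gene2.toList.getD j ' ']) =
          (fun j => pvOk (gene1.toList.getD j ' ') (gene2.toList.getD j ' ')) from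
        funext fun j => pvOk_eq _ _]
      exact all_range_eq_zip pvOk gene1.toList gene2.toList h
    · rw [show (fun j => pvPairsA.contains
            [gene1.toList.getD j ' ', gene2.toList.getD (gene1.toList.length - 1 - j) ' ']) =
          (fun j => pvOk (gene1.toList.getD j ' ')
            (gene2.toList.getD (gene1.toList.length - 1 - j) ' ')) from
        funext fun j => pvOk_eq _ _]
      rw [all_range_congr gene1.toList.length _
          (fun j => pvOk (gene1.toList.getD j ' ') (gene2.toList.reverse.getD j ' '))
          (fun j hj => by rw [getD_reverse_eq gene1.toList gene2.toList h j hj])]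
      exact all_range_eq_zip pvOk gene1.toList gene2.toList.reverse (by simp [h])
  · rw [if_pos h, if_pos h]
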